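-- pv_equiv track=rewrite | github.com/afroz77/Bridgelabz | Week1/Util.py | get_anagram
-- ===== SOURCE A (Python) =====
-- def get_anagram(primearrray):
--
--     anagramarray=[]                         # blank array for storing anagram prime
--     for i in range(len(primearrray) - 1):   # external loop for 1st element
--         str1 = sorted(str(primearrray[i]))  # store first number and sort
--         for j in range(i + 1, len(primearrray)):   # internal loop from i+1 to length of array
--             str2 = sorted(str(primearrray[j]))     # second number and sort
--             if str1 == str2:                       # compare both numbers if equal store in array
--                 anagramarray.append(primearrray[i]) # add in array
--     return anagramarray                             # return anagram array
-- ===== SOURCE B (Python) =====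
-- def get_anagram(primearrray):
--     # One pass with a signature counter: each element is emitted once per
--     # LATER element sharing its sorted-digit signature.
--     sigs = [''.join(sorted(str(x))) for x in primearrray]
--     remaining = {}
--     for s in sigs:
--         remaining[s] = remaining.get(s, 0) + 1
--     out = []
--     for x, s in zip(primearrray, sigs):
--         remaining[s] -= 1
--         out.extend([x] * remaining[s])
--     return out
-- ===== Notes on version B (the rewrite author's own statement) =====
-- stated objective: faster
-- what changed: Replaces the O(n^2) pairwise comparison of sorted-digit strings by one pass that precomputes each number's sorted-digit signature and a signature->count dict, emitting each element repeated by the count of later equal signatures.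
import Mathlib
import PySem

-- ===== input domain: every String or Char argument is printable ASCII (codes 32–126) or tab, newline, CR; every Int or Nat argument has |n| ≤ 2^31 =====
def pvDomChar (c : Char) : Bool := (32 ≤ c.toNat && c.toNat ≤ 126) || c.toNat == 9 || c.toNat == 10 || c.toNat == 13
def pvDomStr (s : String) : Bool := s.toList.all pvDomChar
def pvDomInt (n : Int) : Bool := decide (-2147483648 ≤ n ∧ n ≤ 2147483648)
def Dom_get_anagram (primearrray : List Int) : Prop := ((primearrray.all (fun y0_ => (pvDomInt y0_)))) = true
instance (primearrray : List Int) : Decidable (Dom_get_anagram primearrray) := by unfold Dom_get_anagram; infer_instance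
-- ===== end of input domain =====

-- B replaces A's O(n^2) pairwise anagram scan by one signature pass with a suffix counter (O(n·L log L)).

-- ===== PORT A =====
def get_anagram (primearrray : List Int) : List Int :=
  (PySem.List.pyRange 0 ((primearrray.length : Int) - 1) 1).foldl
    (fun anagramarray i =>
      let str1 := PySem.List.sorted (PySem.Int.toChars (PySem.List.pyGetD primearrray i 0)) (fun c => c) false
      (PySem.List.pyRange (i + 1) (primearrray.length : Int) 1).foldl
        (fun acc j =>
          let str2 := PySem.List.sorted (PySem.Int.toChars (PySem.List.pyGetD primearrray j 0)) (fun c => c) false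
          if str1 = str2 then acc ++ [PySem.List.pyGetD primearrray i 0] else acc)
        anagramarray)
    []

-- ===== PORT B =====
-- signature of one number: tuple(sorted(str(x)))
def pvSigB (x : Int) : List Char := PySem.List.sorted (PySem.Int.toChars x) (fun c => c) false

def get_anagram_alt (primearrray : List Int) : List Int :=
  let sigs := primearrray.map pvSigB
  let remaining := sigs.foldl (fun d s => d.modify s 0 (· + 1)) (PySem.Dict.empty)
  ((primearrray.zip sigs).foldl
      (fun (st : PySem.Dict (List Char) Int × List Int) p =>
        let d := st.1.modify p.2 0 (· - 1)
        (d, st.2 ++ List.replicate (d.getD p.2 0).toNat p.1))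
      (remaining, ([] : List Int))).2

-- ===== PRECONDITION & SPEC =====
def Spec_get_anagram (primearrray : List Int) (out : List Int) : Prop := out = get_anagram_alt primearrray
instance (primearrray : List Int) (out : List Int) : Decidable (Spec_get_anagram primearrray out) := by unfold Spec_get_anagram; infer_instance

-- ===== CLAIM (what is proved, stated in full; the proofs are below) =====
def Claim_equal_get_anagram : Prop := ∀ (primearrray : List Int), Dom_get_anagram primearrray → Spec_get_anagram primearrray (get_anagram primearrray)

-- ===== LEMMAS AND PROOFS =====

-- common reference: each element, repeated once per later element with the same signature
def pvSpec : List Int → List Int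
  | [] => []
  | x :: rest =>
      List.replicate (rest.countP (fun y => decide (pvSigB x = pvSigB y))) x ++ pvSpec rest

lemma pvA_inner (xs : List Int) (k : Nat) (s1 : List Char) (v : Int) (acc : List Int) :
    (PySem.List.pyRange (k : Int) ((xs.length : Int)) 1).foldl
      (fun acc j =>
        if s1 = PySem.List.sorted (PySem.Int.toChars (PySem.List.pyGetD xs j 0)) (fun c => c) false
        then acc ++ [v] else acc) acc
    = acc ++ List.replicate ((xs.drop k).countP (fun y => decide (s1 = pvSigB y))) v := by
  have h := PySem.List.foldl_pyRange_pyGetD xs 0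
      (fun acc y => if s1 = pvSigB y then acc ++ [v] else acc) acc (a := (k : Int)) (by positivity)
  simp only [PySem.List.len_eq] at h
  rw [show ((k : Int)).toNat = k by simp] at h
  rw [show (fun (acc : List Int) (j : Int) =>
        if s1 = PySem.List.sorted (PySem.Int.toChars (PySem.List.pyGetD xs j 0)) (fun c => c) false
        then acc ++ [v] else acc)
      = (fun acc j => (fun acc y => if s1 = pvSigB y then acc ++ [v] else acc) acc (PySem.List.pyGetD xs j 0)) from rfl]
  rw [h]
  have hfe : (fun (acc : List Int) (y : Int) => if s1 = pvSigB y then acc ++ [v] else acc)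
      = (fun acc y => if decide (s1 = pvSigB y) = true then acc ++ [v] else acc) := by
    funext acc y; simp
  rw [hfe, PySem.List.foldl_append_if (fun y => decide (s1 = pvSigB y)) (fun _ => v)]
  congr 1
  rw [List.map_const']
  simp [← List.countP_eq_length_filter]

lemma pvA_outer (xs : List Int) : ∀ (m k : Nat), xs.length - k ≤ m → ∀ (acc : List Int),
    (PySem.List.pyRange (k : Int) ((xs.length : Int) - 1) 1).foldl
      (fun anagramarray i =>
        let str1 := PySem.List.sorted (PySem.Int.toChars (PySem.List.pyGetD xs i 0)) (fun c => c) false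
        (PySem.List.pyRange (i + 1) ((xs.length : Int)) 1).foldl
          (fun acc j =>
            let str2 := PySem.List.sorted (PySem.Int.toChars (PySem.List.pyGetD xs j 0)) (fun c => c) false
            if str1 = str2 then acc ++ [PySem.List.pyGetD xs i 0] else acc)
          anagramarray) acc
    = acc ++ pvSpec (xs.drop k) := by
  intro m
  induction m with
  | zero =>
      intro k hk acc
      have hge : xs.length ≤ k := by omega
      rw [PySem.List.pyRange_one_eq_nil (by omega)]
      simp [List.drop_eq_nil_of_le hge, pvSpec]
  | succ m ih =>
      intro k hk acc
      by_cases hlt : (k : Int) < (xs.length : Int) - 1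
      · have hklen : k < xs.length := by omega
        rw [PySem.List.pyRange_one_cons hlt]
        simp only [List.foldl_cons]
        have hget : PySem.List.pyGetD xs (k : Int) 0 = xs[k] := by
          rw [PySem.List.pyGetD_eq_getElem xs 0 (by positivity) (by exact_mod_cast hklen)]
          simp
        rw [show ((k : Int) + 1) = ((k + 1 : Nat) : Int) by omega]
        rw [pvA_inner xs (k + 1)]
        rw [ih (k + 1) (by omega)]
        rw [List.drop_eq_getElem_cons hklen]
        simp only [pvSpec, hget, pvSigB, List.append_assoc]
        rfl
      · -- at most one element remains: the outer range is empty and pvSpec of ≤1 element is []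
        rw [PySem.List.pyRange_one_eq_nil (by omega)]
        simp only [List.foldl_nil]
        rcases Nat.lt_or_ge k xs.length with hklen | hge
        · have hk1 : k = xs.length - 1 := by omega
          rw [List.drop_eq_getElem_cons hklen]
          have : xs.drop (k + 1) = [] := List.drop_eq_nil_of_le (by omega)
          rw [this]
          simp [pvSpec]
        · simp [List.drop_eq_nil_of_le hge, pvSpec]

lemma pvB_fold : ∀ (l : List Int) (d : PySem.Dict (List Char) Int) (out : List Int),
    (∀ s, d.getD s 0 = ((l.map pvSigB).count s : Int)) →
    ((l.zip (l.map pvSigB)).foldl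
        (fun (st : PySem.Dict (List Char) Int × List Int) p =>
          let d := st.1.modify p.2 0 (· - 1)
          (d, st.2 ++ List.replicate (d.getD p.2 0).toNat p.1))
        (d, out)).2
    = out ++ pvSpec l := by
  intro l
  induction l with
  | nil => intro d out _; simp [pvSpec]
  | cons x rest ih =>
      intro d out hd
      simp only [List.map_cons, List.zip_cons_cons, List.foldl_cons]
      have hself : (d.modify (pvSigB x) 0 (· - 1)).getD (pvSigB x) 0
          = ((rest.map pvSigB).count (pvSigB x) : Int) := by
        rw [PySem.Dict.getD_modify_self]
        rw [hd (pvSigB x)]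
        simp only [List.map_cons, List.count_cons_self]
        push_cast; ring
      have hinv : ∀ s, (d.modify (pvSigB x) 0 (· - 1)).getD s 0 = ((rest.map pvSigB).count s : Int) := by
        intro s
        by_cases hs : s = pvSigB x
        · rw [hs]; exact hself
        · rw [PySem.Dict.getD_modify_of_ne d 0 (· - 1) hs, hd s]
          simp only [List.map_cons]
          rw [List.count_cons_of_ne (by simpa using Ne.symm hs)]
      rw [ih _ _ hinv]
      have hcnt : ((d.modify (pvSigB x) 0 (· - 1)).getD (pvSigB x) 0).toNat
          = rest.countP (fun y => decide (pvSigB x = pvSigB y)) := by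
        rw [hself]
        rw [Int.toNat_natCast]
        rw [List.count_eq_countP, List.countP_map]
        apply List.countP_congr
        intro y _
        simp only [Function.comp_apply, beq_iff_eq, decide_eq_true_eq]
        exact eq_comm
      simp only [pvSpec, hcnt, List.append_assoc]

lemma pvB_eq (xs : List Int) : get_anagram_alt xs = pvSpec xs := by
  unfold get_anagram_alt
  apply pvB_fold
  intro s
  rw [PySem.Dict.getD_foldl_modify_add_one]
  simp

-- ===== VERDICT (by name: the statement is the Claim_ definition above) =====
theorem get_anagram_spec : Claim_equal_get_anagram := by
  intro xs _
  unfold Spec_get_anagram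
  rw [pvB_eq]
  have h := pvA_outer xs xs.length 0 (by omega) []
  simpa [get_anagram] using h
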